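-- pv_equiv track=rewrite | github.com/mhinz/neovim-remote | nvr/nvr.py | split_cmds_from_files
-- ===== SOURCE A (Python) =====
-- def split_cmds_from_files(args):
--     cmds = []
--     files = []
--     for _ in range(len(args)):
--         if args[0][0] == '+':
--             cmds.append(args.pop(0)[1:])
--         elif args[0] == '--':
--             args.pop(0)
--             files += args
--             break
--         else:
--             files.append(args.pop(0))
--     return cmds, files
-- ===== SOURCE B (Python) =====
-- def split_cmds_from_files(args):
--     if '--' in args:
--         i = args.index('--')
--         prefix, suffix = args[:i], args[i + 1:]
--     else:
--         prefix, suffix = args, []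
--     cmds = [a[1:] for a in prefix if a.startswith('+')]
--     files = [a for a in prefix if not a.startswith('+')] + suffix
--     args[:] = suffix
--     return cmds, files
-- ===== Notes on version B (the rewrite author's own statement) =====
-- stated objective: faster
-- what changed: Replaces A's destructive pop-one-element-per-iteration loop with a single split at the first '--' separator followed by two comprehensions over the prefix (the same trailing assignment args[:] = suffix reproduces A's in-place mutation).
-- outside the precondition, e.g. on split_cmds_from_files(['a', '', 'b']): A raises IndexError, B returns ([], ['a', '', 'b'])
import Mathlib
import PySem

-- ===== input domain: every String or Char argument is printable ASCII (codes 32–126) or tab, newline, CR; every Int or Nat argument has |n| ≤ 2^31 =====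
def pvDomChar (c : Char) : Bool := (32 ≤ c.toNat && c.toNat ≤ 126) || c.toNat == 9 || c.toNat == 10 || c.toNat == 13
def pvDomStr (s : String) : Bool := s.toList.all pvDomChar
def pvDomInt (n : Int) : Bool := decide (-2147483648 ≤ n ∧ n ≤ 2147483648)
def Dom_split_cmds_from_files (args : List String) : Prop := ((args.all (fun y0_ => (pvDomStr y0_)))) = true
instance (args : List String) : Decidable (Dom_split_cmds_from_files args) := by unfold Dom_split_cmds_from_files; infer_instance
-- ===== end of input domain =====

-- B replaces A's destructive pop-per-iteration loop by one split at the first "--" plus two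
-- comprehensions (objective: simpler); B performs the same in-place mutation via args[:] = suffix,
-- and the theorems below are about the return value.

-- ===== PORT A =====
-- 'for _ in range(len(args))' with front-pops: fuel-indexed loop over (cmds, files, args).
def pvLoopA : Nat → List String → List String → List String → List String × List String
  | 0, cmds, files, _ => (cmds, files)
  | Nat.succ n, cmds, files, args =>
    match args with
    | [] => (cmds, files)          -- unreachable: each iteration pops one element (fuel = initial length)
    | a :: rest =>
      match PySem.Str.pyGet? a 0 with
      | none => (cmds, files)      -- args[0][0] raises IndexError on ""; excluded by Pre_
      | some c =>
        if c = '+' then pvLoopA n (cmds ++ [PySem.Str.slice a (some 1) none]) files rest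
        else if a = "--" then (cmds, files ++ rest)
        else pvLoopA n cmds (files ++ [a]) rest

def split_cmds_from_files (args : List String) : List String × List String :=
  pvLoopA args.length [] [] args

-- ===== PORT B =====
def split_cmds_from_files_alt (args : List String) : List String × List String :=
  let ps : List String × List String :=
    if args.contains "--" then
      match PySem.List.index? args "--" with
      | some i => (PySem.List.slice args none (some (i : Int)),
                   PySem.List.slice args (some ((i : Int) + 1)) none)
      | none => (args, [])
    else (args, [])
  ((ps.1.filter (fun a => PySem.Str.startswith a "+")).map
      (fun a => PySem.Str.slice a (some 1) none),
   ps.1.filter (fun a => !(PySem.Str.startswith a "+")) ++ ps.2)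

-- ===== PRECONDITION & SPEC =====
-- Pre_ excludes inputs containing "" before the first "--": there A's 'args[0][0]' raises IndexError.
def Pre_split_cmds_from_files (args : List String) : Prop :=
  "" ∉ args.takeWhile (fun a => !(a == "--"))
instance (args : List String) : Decidable (Pre_split_cmds_from_files args) := by
  unfold Pre_split_cmds_from_files; infer_instance
def pvWitness_split_cmds_from_files : List String := ["+cmd", "a", "--", "", "b"]

def Spec_split_cmds_from_files (args : List String) (out : List String × List String) : Prop :=
  out = split_cmds_from_files_alt args
instance (args : List String) (out : List String × List String) :
    Decidable (Spec_split_cmds_from_files args out) := by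
  unfold Spec_split_cmds_from_files; infer_instance

-- ===== CLAIM (what is proved, stated in full; the proofs are below) =====
def Claim_equal_split_cmds_from_files : Prop :=
  ∀ (args : List String), Dom_split_cmds_from_files args →
    Pre_split_cmds_from_files args →
    Spec_split_cmds_from_files args (split_cmds_from_files args)

-- ===== LEMMAS AND PROOFS =====

lemma alt_nil : split_cmds_from_files_alt [] = ([], []) := by
  simp [split_cmds_from_files_alt]

lemma alt_dashdash (rest : List String) :
    split_cmds_from_files_alt ("--" :: rest) = ([], rest) := by
  simp only [split_cmds_from_files_alt, List.contains_cons, BEq.rfl, Bool.true_or, if_pos]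
  rw [PySem.List.index?_cons_self]
  simp [PySem.List.slice_to, PySem.List.slice_from]

lemma alt_cons (a : String) (rest : List String) (ha : a ≠ "--") :
    split_cmds_from_files_alt (a :: rest) =
      (if PySem.Str.startswith a "+" then
        (PySem.Str.slice a (some 1) none :: (split_cmds_from_files_alt rest).1,
         (split_cmds_from_files_alt rest).2)
      else
        ((split_cmds_from_files_alt rest).1,
         a :: (split_cmds_from_files_alt rest).2)) := by
  by_cases hm : rest.contains "--"
  · have hmem : "--" ∈ rest := by simpa using hm
    obtain ⟨i, hi⟩ := Option.isSome_iff_exists.mp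
      ((PySem.List.index?_isSome_iff rest "--").mpr hmem)
    have hi2 : List.idxOf? "--" rest = some i := by
      rw [← PySem.List.index?_eq_idxOf?]; exact hi
    have hi' : List.idxOf? "--" (a :: rest) = some (i + 1) := by
      rw [← PySem.List.index?_eq_idxOf?, PySem.List.index?_cons_of_ne rest ha, hi]; rfl
    have h2 : PySem.List.slice (a :: rest) (some (((i : Int) + 1) + 1)) none =
        PySem.List.slice rest (some ((i : Int) + 1)) none := by
      have e1 : ((i : Int) + 1) + 1 = ((i + 2 : Nat) : Int) := by push_cast; ring
      have e2 : ((i : Int) + 1) = ((i + 1 : Nat) : Int) := by push_cast; ring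
      rw [e1, e2, PySem.List.slice_from_natCast, PySem.List.slice_from_natCast]
      rfl
    have h1 : PySem.List.slice (a :: rest) none (some ((i : Int) + 1)) =
        a :: List.take i rest := by
      have e2 : ((i : Int) + 1) = ((i + 1 : Nat) : Int) := by push_cast; ring
      rw [e2, PySem.List.slice_to_natCast]; rfl
    simp only [split_cmds_from_files_alt, List.contains_cons, hm, Bool.or_true, if_pos,
      PySem.List.index?_eq_idxOf?, hi2, hi']
    push_cast
    rw [h2, h1]
    by_cases hs : PySem.Chars.startswith a.toList ['+'] = true <;> simp [hs]
  · have hc : (a :: rest).contains "--" = false := by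
      simp only [List.contains_cons, Bool.or_eq_false_iff]
      exact ⟨by simpa using fun h => ha h.symm, by simpa using hm⟩
    simp only [split_cmds_from_files_alt, hc, hm, Bool.false_eq_true, if_false]
    by_cases hs : PySem.Chars.startswith a.toList ['+'] = true <;> simp [hs]

lemma loop_eq (args : List String) : ∀ (cmds files : List String),
    Pre_split_cmds_from_files args →
    pvLoopA args.length cmds files args =
      (cmds ++ (split_cmds_from_files_alt args).1,
       files ++ (split_cmds_from_files_alt args).2) := by
  induction args with
  | nil => intro cmds files _; simp [pvLoopA, alt_nil]
  | cons a rest ih =>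
    intro cmds files h
    by_cases hdd : a = "--"
    · subst hdd
      have hget : PySem.Str.pyGet? "--" 0 = some '-' := by decide
      simp [pvLoopA, alt_dashdash]
    · have htw : List.takeWhile (fun a => !(a == "--")) (a :: rest)
          = a :: List.takeWhile (fun a => !(a == "--")) rest := by
        simp [hdd]
      have hpre : Pre_split_cmds_from_files rest :=
        fun hx => h (htw ▸ List.mem_cons_of_mem a hx)
      have ha0 : a ≠ "" := by
        intro hae
        subst hae
        exact h (htw ▸ List.mem_cons_self)
      obtain ⟨c, cs, hta⟩ : ∃ c cs, a.toList = c :: cs := by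
        cases hta : a.toList with
        | nil => exact absurd (String.toList_inj.mp (by rw [hta]; rfl)) ha0
        | cons c cs => exact ⟨c, cs, rfl⟩
      have hget : PySem.Str.pyGet? a 0 = some c := by
        simp [PySem.List.pyGet?, PySem.List.pyIdx?, hta]
      rw [List.length_cons]
      by_cases hc : c = '+'
      · subst hc
        have hst : PySem.Chars.startswith a.toList ['+'] = true :=
          (PySem.Chars.startswith_iff a.toList ['+']).mpr ⟨cs, by rw [hta]; rfl⟩
        simp only [pvLoopA, hget]
        rw [ih _ _ hpre, alt_cons a rest hdd]
        simp [PySem.Str.startswith, hst]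
      · have hst : PySem.Chars.startswith a.toList ['+'] = false := by
          rw [← Bool.not_eq_true]
          intro hs
          obtain ⟨t, ht⟩ := (PySem.Chars.startswith_iff _ _).mp hs
          rw [hta] at ht
          exact hc (by injection ht with h1 _; exact h1.symm)
        simp only [pvLoopA, hget, if_neg hc, if_neg hdd]
        rw [ih _ _ hpre, alt_cons a rest hdd]
        simp [PySem.Str.startswith, hst]

-- ===== VERDICT (by name: the statement is the Claim_ definition above) =====
theorem split_cmds_from_files_spec : Claim_equal_split_cmds_from_files := by
  intro args _ hpre
  unfold Spec_split_cmds_from_files split_cmds_from_files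
  simpa using loop_eq args [] [] hpre
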